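-- pv_equiv track=rewrite | github.com/ranga-1/appify-om | app/services/permissions/permission_checker.py | get_data_scope
-- ===== SOURCE A (Python) =====
-- from typing import List, Dict, Optional, Set
-- from enum import Enum
--
-- class Scope(str, Enum):
--     """Data access scopes."""
--     SELF = "self"
--     TEAM = "team"
--     DEPARTMENT = "department"
--     ALL = "all"
--     NONE = "none"
--
-- def get_data_scope(permissions: List[str], action: str = "read") -> Scope:
--     """
--     Extract the most permissive data scope for an action.
--
--     Args:
--         permissions: List of permission strings
--         action: Action to check (read, create, update, delete)
--
--     Returns:
--         Highest scope level (all > department > team > self > none)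
--
--     Examples:
--         >>> get_data_scope(["data:read:scope:team"], "read")
--         Scope.TEAM
--         >>> get_data_scope(["data:*"], "update")
--         Scope.ALL  # Wildcard grants all scope
--     """
--     scope_hierarchy = {
--         Scope.NONE: 0,
--         Scope.SELF: 1,
--         Scope.TEAM: 2,
--         Scope.DEPARTMENT: 3,
--         Scope.ALL: 4,
--     }
--
--     max_scope = Scope.NONE
--     max_scope_level = 0
--
--     for permission in permissions:
--         # Check for wildcard grants
--         if permission == "data:*" or permission == "admin:*":
--             return Scope.ALL
--
--         # Check specific action scope
--         parts = permission.split(":")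
--         if len(parts) >= 4 and parts[0] == "data" and parts[1] == action and parts[2] == "scope":
--             scope_value = parts[3]
--             try:
--                 scope = Scope(scope_value)
--                 scope_level = scope_hierarchy.get(scope, 0)
--                 if scope_level > max_scope_level:
--                     max_scope_level = scope_level
--                     max_scope = scope
--             except ValueError:
--                 # Invalid scope value, skip
--                 continue
--
--         # Check wildcard action grants
--         if len(parts) >= 4 and parts[0] == "data" and parts[1] == "*" and parts[2] == "scope":
--             scope_value = parts[3]
--             try:
--                 scope = Scope(scope_value)
--                 scope_level = scope_hierarchy.get(scope, 0)
--                 if scope_level > max_scope_level: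
--                     max_scope_level = scope_level
--                     max_scope = scope
--             except ValueError:
--                 continue
--
--     return max_scope
-- ===== SOURCE B (Python) =====
-- from typing import List
-- from enum import Enum
--
-- class Scope(str, Enum):
--     SELF = "self"
--     TEAM = "team"
--     DEPARTMENT = "department"
--     ALL = "all"
--     NONE = "none"
--
-- def _grants(permission: str, action: str, scope_value: str) -> bool:
--     """Does this permission grant exactly this scope value for `action`?"""
--     parts = permission.split(":")
--     return (len(parts) >= 4 and parts[0] == "data"
--             and parts[1] in (action, "*") and parts[2] == "scope"
--             and parts[3] == scope_value)
--
-- def get_data_scope(permissions: List[str], action: str = "read") -> Scope: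
--     if "data:*" in permissions or "admin:*" in permissions:
--         return Scope.ALL
--     # Walk the hierarchy top-down; the first scope level anyone grants wins.
--     for scope in (Scope.ALL, Scope.DEPARTMENT, Scope.TEAM, Scope.SELF):
--         if any(_grants(p, action, scope.value) for p in permissions):
--             return scope
--     return Scope.NONE
-- ===== Notes on version B (the rewrite author's own statement) =====
-- stated objective: simpler
-- what changed: A keeps a running maximum (scope, level) while parsing each permission once; B has no maximum and no hierarchy table: it checks the scope levels top-down (all, department, team, self) with one membership scan per level and returns the first level that any permission grants.
import Mathlib
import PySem

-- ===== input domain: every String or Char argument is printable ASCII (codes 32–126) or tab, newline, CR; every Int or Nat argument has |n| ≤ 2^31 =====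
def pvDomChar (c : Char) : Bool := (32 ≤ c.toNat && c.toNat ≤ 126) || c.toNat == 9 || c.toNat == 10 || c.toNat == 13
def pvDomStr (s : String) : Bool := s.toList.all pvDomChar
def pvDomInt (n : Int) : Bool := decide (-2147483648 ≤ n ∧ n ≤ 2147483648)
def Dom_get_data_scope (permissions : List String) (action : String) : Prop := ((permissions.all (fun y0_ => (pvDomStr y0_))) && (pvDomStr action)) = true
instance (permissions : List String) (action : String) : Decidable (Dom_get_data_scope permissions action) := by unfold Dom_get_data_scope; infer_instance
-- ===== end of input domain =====

-- B drops A's running maximum and hierarchy table entirely: after the wildcard check it walks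
-- the scope levels top-down (all, department, team, self), one membership scan per level,
-- returning the first level any permission grants (objective: simpler).

-- Scopes are represented by their string values ("self", "team", "department", "all", "none").

-- ===== PORT A =====
-- A-side tables: Scope(v) validity and scope_hierarchy.get(scope, 0)
def isScopeStr (v : String) : Bool :=
  v = "self" || v = "team" || v = "department" || v = "all" || v = "none"

def levelOf (v : String) : Int :=
  if v = "none" then 0 else if v = "self" then 1 else if v = "team" then 2
  else if v = "department" then 3 else if v = "all" then 4 else 0

-- p.split(":") — exact: the separator ":" is nonempty, so PySem.Str.split? returns some
def splitColon (p : String) : List String := (PySem.Str.split? p ":").getD []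

-- one A-loop iteration after the wildcard check: the two sequential branch updates, with the
-- `continue` of the first branch's except skipping the second branch
def stepA (action : String) (acc : String × Int) (p : String) : String × Int :=
  let parts := splitColon p
  if 4 ≤ parts.length ∧ parts.getD 0 "" = "data" ∧ parts.getD 1 "" = action ∧ parts.getD 2 "" = "scope" then
    if isScopeStr (parts.getD 3 "") then
      let acc1 := if levelOf (parts.getD 3 "") > acc.2 then (parts.getD 3 "", levelOf (parts.getD 3 "")) else acc
      if 4 ≤ parts.length ∧ parts.getD 0 "" = "data" ∧ parts.getD 1 "" = "*" ∧ parts.getD 2 "" = "scope" then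
        if isScopeStr (parts.getD 3 "") then
          if levelOf (parts.getD 3 "") > acc1.2 then (parts.getD 3 "", levelOf (parts.getD 3 "")) else acc1
        else acc1
      else acc1
    else acc  -- ValueError: continue
  else if 4 ≤ parts.length ∧ parts.getD 0 "" = "data" ∧ parts.getD 1 "" = "*" ∧ parts.getD 2 "" = "scope" then
    if isScopeStr (parts.getD 3 "") then
      if levelOf (parts.getD 3 "") > acc.2 then (parts.getD 3 "", levelOf (parts.getD 3 "")) else acc
    else acc
  else acc

def loopA (action : String) : List String → String × Int → String
  | [], acc => acc.1
  | p :: rest, acc =>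
    if p = "data:*" ∨ p = "admin:*" then "all"
    else loopA action rest (stepA action acc p)

def get_data_scope (permissions : List String) (action : String) : String :=
  loopA action permissions ("none", 0)

-- ===== PORT B =====
-- does `p` grant exactly scope value `v` for `action`? (B's _grants helper: one boolean conjunction)
def grantsB (action v p : String) : Bool :=
  let parts := splitColon p
  decide (4 ≤ parts.length ∧ parts.getD 0 "" = "data" ∧
    (parts.getD 1 "" = action ∨ parts.getD 1 "" = "*") ∧
    parts.getD 2 "" = "scope" ∧ parts.getD 3 "" = v)

def get_data_scope_alt (permissions : List String) (action : String) : String :=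
  if permissions.contains "data:*" || permissions.contains "admin:*" then "all"
  else if permissions.any (grantsB action "all") then "all"
  else if permissions.any (grantsB action "department") then "department"
  else if permissions.any (grantsB action "team") then "team"
  else if permissions.any (grantsB action "self") then "self"
  else "none"

-- ===== PRECONDITION & SPEC =====
def Spec_get_data_scope (permissions : List String) (action : String) (out : String) : Prop := out = get_data_scope_alt permissions action
instance (permissions : List String) (action : String) (out : String) : Decidable (Spec_get_data_scope permissions action out) := by unfold Spec_get_data_scope; infer_instance

-- ===== CLAIM (what is proved, stated in full; the proofs are below) =====
def Claim_equal_get_data_scope : Prop := ∀ (permissions : List String) (action : String), Dom_get_data_scope permissions action → Spec_get_data_scope permissions action (get_data_scope permissions action)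

-- ===== LEMMAS AND PROOFS =====

-- proof-side bridge: the valid scope a single permission grants, if any
def candOf (action : String) (p : String) : Option String :=
  let parts := splitColon p
  if 4 ≤ parts.length ∧ parts.getD 0 "" = "data" ∧ (parts.getD 1 "" = action ∨ parts.getD 1 "" = "*") ∧
      parts.getD 2 "" = "scope" ∧ isScopeStr (parts.getD 3 "") then
    some (parts.getD 3 "")
  else none

-- one A-iteration (past the wildcard check) acts on the running maximum exactly as
-- incorporating the permission's candidate (if any)
theorem stepA_eq (action p best : String) :
    stepA action (best, levelOf best) p =
      (match candOf action p with
       | none => (best, levelOf best)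
       | some c => if levelOf best < levelOf c then (c, levelOf c) else (best, levelOf best)) := by
  unfold stepA candOf
  set parts := splitColon p with hparts
  by_cases h1 : 4 ≤ parts.length ∧ parts.getD 0 "" = "data" ∧ parts.getD 1 "" = action ∧ parts.getD 2 "" = "scope"
  · rw [if_pos h1]
    by_cases hS : isScopeStr (parts.getD 3 "") = true
    · have hcc : 4 ≤ parts.length ∧ parts.getD 0 "" = "data" ∧
          (parts.getD 1 "" = action ∨ parts.getD 1 "" = "*") ∧ parts.getD 2 "" = "scope" ∧
          isScopeStr (parts.getD 3 "") = true :=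
        ⟨h1.1, h1.2.1, Or.inl h1.2.2.1, h1.2.2.2, hS⟩
      rw [if_pos hS, if_pos hcc]
      by_cases h2 : 4 ≤ parts.length ∧ parts.getD 0 "" = "data" ∧ parts.getD 1 "" = "*" ∧ parts.getD 2 "" = "scope"
      · simp only [if_pos h2, if_pos hS]
        split_ifs <;> rfl
      · simp only [if_neg h2]
    · have hncc : ¬ (4 ≤ parts.length ∧ parts.getD 0 "" = "data" ∧
          (parts.getD 1 "" = action ∨ parts.getD 1 "" = "*") ∧ parts.getD 2 "" = "scope" ∧
          isScopeStr (parts.getD 3 "") = true) := fun h => hS h.2.2.2.2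
      rw [if_neg hS, if_neg hncc]
  · rw [if_neg h1]
    by_cases h2 : 4 ≤ parts.length ∧ parts.getD 0 "" = "data" ∧ parts.getD 1 "" = "*" ∧ parts.getD 2 "" = "scope"
    · rw [if_pos h2]
      by_cases hS : isScopeStr (parts.getD 3 "") = true
      · have hcc : 4 ≤ parts.length ∧ parts.getD 0 "" = "data" ∧
            (parts.getD 1 "" = action ∨ parts.getD 1 "" = "*") ∧ parts.getD 2 "" = "scope" ∧
            isScopeStr (parts.getD 3 "") = true :=
          ⟨h2.1, h2.2.1, Or.inr h2.2.2.1, h2.2.2.2, hS⟩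
        rw [if_pos hS, if_pos hcc]
      · have hncc : ¬ (4 ≤ parts.length ∧ parts.getD 0 "" = "data" ∧
            (parts.getD 1 "" = action ∨ parts.getD 1 "" = "*") ∧ parts.getD 2 "" = "scope" ∧
            isScopeStr (parts.getD 3 "") = true) := fun h => hS h.2.2.2.2
        rw [if_neg hS, if_neg hncc]
    · have hncc : ¬ (4 ≤ parts.length ∧ parts.getD 0 "" = "data" ∧
          (parts.getD 1 "" = action ∨ parts.getD 1 "" = "*") ∧ parts.getD 2 "" = "scope" ∧
          isScopeStr (parts.getD 3 "") = true) := by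
        rintro ⟨ha, hb, hc | hc, hd, hs⟩
        · exact h1 ⟨ha, hb, hc, hd⟩
        · exact h2 ⟨ha, hb, hc, hd⟩
      rw [if_neg h2, if_neg hncc]

theorem stepA_none (action p best : String) (hcand : candOf action p = none) :
    stepA action (best, levelOf best) p = (best, levelOf best) := by
  rw [stepA_eq, hcand]

theorem stepA_some (action p best c : String) (hcand : candOf action p = some c) :
    stepA action (best, levelOf best) p =
      (if levelOf best < levelOf c then (c, levelOf c) else (best, levelOf best)) := by
  rw [stepA_eq, hcand]

-- every candidate is a valid scope value
theorem cand_valid (action p c : String) (h : candOf action p = some c) : isScopeStr c = true := by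
  simp only [candOf] at h
  split at h
  · next hc => cases h; exact hc.2.2.2.2
  · next => cases h

-- B's _grants test for a concrete valid scope value picks out exactly that candidate
theorem grantsB_iff (action v p : String) (hv : isScopeStr v = true) :
    grantsB action v p = true ↔ candOf action p = some v := by
  simp only [grantsB, candOf, decide_eq_true_eq]
  split
  · next hc =>
    simp only [Option.some.injEq]
    constructor
    · rintro ⟨_, _, _, _, h5⟩; exact h5
    · intro h5; exact ⟨hc.1, hc.2.1, hc.2.2.1, hc.2.2.2.1, h5⟩
  · next hc =>
    constructor
    · rintro ⟨h1, h2, h3, h4, h5⟩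
      exact absurd ⟨h1, h2, h3, h4, by rw [h5]; exact hv⟩ hc
    · intro h; cases h
  
-- membership of v among the candidates = B's any-scan with _grants
theorem mem_cand (permissions : List String) (action v : String) (hv : isScopeStr v = true) :
    (v ∈ permissions.filterMap (candOf action)) ↔ ∃ p ∈ permissions, grantsB action v p = true := by
  simp only [List.mem_filterMap]
  constructor
  · rintro ⟨p, hp, hc⟩; exact ⟨p, hp, (grantsB_iff action v p hv).mpr hc⟩
  · rintro ⟨p, hp, hg⟩; exact ⟨p, hp, (grantsB_iff action v p hv).mp hg⟩

-- staged top-down selection over a list of valid scope values, seeded with the running best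
def maxStage (best : String) (cs : List String) : String :=
  if best = "all" ∨ "all" ∈ cs then "all"
  else if best = "department" ∨ "department" ∈ cs then "department"
  else if best = "team" ∨ "team" ∈ cs then "team"
  else if best = "self" ∨ "self" ∈ cs then "self"
  else "none"

-- the running-maximum fold equals the staged top-down selection, for valid scope values
theorem foldl_max_eq_stage (cs : List String) (best : String)
    (hb : isScopeStr best = true) (hcs : ∀ c ∈ cs, isScopeStr c = true) :
    cs.foldl (fun b c => if levelOf b < levelOf c then c else b) best = maxStage best cs := by
  induction cs generalizing best with
  | nil =>
    simp only [List.foldl_nil, maxStage, List.not_mem_nil, or_false]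
    unfold isScopeStr at hb
    simp only [Bool.or_eq_true, decide_eq_true_eq] at hb
    rcases hb with ((((h|h)|h)|h)|h) <;> subst h <;> simp
  | cons c cs ih =>
    have hc : isScopeStr c = true := hcs c (by simp)
    have hcs' : ∀ x ∈ cs, isScopeStr x = true := fun x hx => hcs x (by simp [hx])
    rw [List.foldl_cons]
    have hb' : isScopeStr (if levelOf best < levelOf c then c else best) = true := by
      split_ifs <;> assumption
    rw [ih _ hb' hcs']
    unfold isScopeStr at hb hc
    simp only [Bool.or_eq_true, decide_eq_true_eq] at hb hc
    rcases hb with ((((h|h)|h)|h)|h) <;> subst h <;>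
      rcases hc with ((((h|h)|h)|h)|h) <;> subst h <;>
      simp [maxStage, levelOf, List.mem_cons]

-- the A-loop equals the wildcard check followed by the running-maximum over candidates
theorem loopA_eq (action : String) (ps : List String) (best : String)
    (hb : isScopeStr best = true) :
    loopA action ps (best, levelOf best) =
      (if "data:*" ∈ ps ∨ "admin:*" ∈ ps then "all"
       else (ps.filterMap (candOf action)).foldl
         (fun b c => if levelOf b < levelOf c then c else b) best) := by
  induction ps generalizing best with
  | nil => simp [loopA]
  | cons p rest ih =>
    by_cases hw : p = "data:*" ∨ p = "admin:*"
    · have hm : "data:*" ∈ p :: rest ∨ "admin:*" ∈ p :: rest := by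
        rcases hw with h | h <;> subst h <;> simp
      simp only [loopA]
      rw [if_pos hw, if_pos hm]
    · have h1 : p ≠ "data:*" := fun h => hw (Or.inl h)
      have h2 : p ≠ "admin:*" := fun h => hw (Or.inr h)
      have hiff : ("data:*" ∈ rest ∨ "admin:*" ∈ rest) ↔
          ("data:*" ∈ p :: rest ∨ "admin:*" ∈ p :: rest) := by
        simp [List.mem_cons, Ne.symm h1, Ne.symm h2]
      simp only [loopA]
      rw [if_neg hw]
      cases hcand : candOf action p with
      | none =>
        rw [stepA_none action p best hcand, ih _ hb]
        simp only [List.filterMap_cons, hcand]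
        exact if_congr hiff rfl rfl
      | some c =>
        have hcv := cand_valid action p c hcand
        rw [stepA_some action p best c hcand]
        by_cases hlt : levelOf best < levelOf c
        · rw [if_pos hlt, ih _ hcv]
          simp only [List.filterMap_cons, hcand, List.foldl_cons]
          rw [if_pos hlt]
          exact if_congr hiff rfl rfl
        · rw [if_neg hlt, ih _ hb]
          simp only [List.filterMap_cons, hcand, List.foldl_cons]
          rw [if_neg hlt]
          exact if_congr hiff rfl rfl

-- ===== VERDICT (by name: the statement is the Claim_ definition above) =====
theorem get_data_scope_spec : Claim_equal_get_data_scope := by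
  intro permissions action _
  unfold Spec_get_data_scope get_data_scope get_data_scope_alt
  have h0 : (0 : Int) = levelOf "none" := by simp [levelOf]
  rw [h0, loopA_eq _ _ _ (by decide)]
  have hcs : ∀ c ∈ permissions.filterMap (candOf action), isScopeStr c = true := by
    intro c hcmem
    obtain ⟨p, _, hp⟩ := List.mem_filterMap.mp hcmem
    exact cand_valid action p c hp
  rw [foldl_max_eq_stage _ _ (by decide) hcs]
  by_cases hw : "data:*" ∈ permissions ∨ "admin:*" ∈ permissions
  · rw [if_pos hw, if_pos (by simpa using hw)]
  · rw [if_neg hw, if_neg (by simpa using hw)]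
    have hall := mem_cand permissions action "all" (by decide)
    have hdep := mem_cand permissions action "department" (by decide)
    have hteam := mem_cand permissions action "team" (by decide)
    have hself := mem_cand permissions action "self" (by decide)
    simp [maxStage, List.any_eq_true, hall, hdep, hteam, hself]
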